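-- pv_equiv track=rewrite | github.com/VaninaBlas/Guias | Practicas td1/recursion_parcial.py | multiplicar_pos_impares
-- ===== SOURCE A (Python) =====
-- def multiplicar_pos_impares(xs:list[int])->int:
--     """
--     Requiere:nada
--     Devuelve:el producto entre los elementos que se encuentran en las posiciones impares de xs
--     """
--     i=len(xs)-1
--     if len(xs)<2:
--         return 1
--     else:
--         if(i%2!=0):
--             return xs[i]*multiplicar_pos_impares(xs[:i])
--         else:
--             return multiplicar_pos_impares(xs[:i])
-- ===== SOURCE B (Python) =====
-- def multiplicar_pos_impares(xs: list[int]) -> int: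
--     prod = 1
--     for i in range(1, len(xs), 2):
--         prod *= xs[i]
--     return prod
-- ===== Notes on version B (the rewrite author's own statement) =====
-- stated objective: faster
-- what changed: Replaces back-to-front recursion over prefix slices (each call copies xs[:i]) with a single forward loop over the odd indices keeping a running product.
import Mathlib
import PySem

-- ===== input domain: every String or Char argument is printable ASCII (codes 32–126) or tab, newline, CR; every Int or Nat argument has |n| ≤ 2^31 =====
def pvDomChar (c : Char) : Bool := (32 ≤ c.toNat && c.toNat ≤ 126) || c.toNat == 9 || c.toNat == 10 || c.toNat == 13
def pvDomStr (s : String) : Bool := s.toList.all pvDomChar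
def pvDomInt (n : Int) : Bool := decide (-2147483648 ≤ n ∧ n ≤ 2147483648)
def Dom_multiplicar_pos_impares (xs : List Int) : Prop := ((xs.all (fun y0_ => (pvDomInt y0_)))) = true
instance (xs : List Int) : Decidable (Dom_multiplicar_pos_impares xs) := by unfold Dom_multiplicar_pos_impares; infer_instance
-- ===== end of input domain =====

-- B replaces A's back-to-front recursion over prefix slices (each call copies xs[:i])
-- with one forward loop over the odd indices keeping a running product.

-- ===== PORT A =====
-- literal port of A: i = len(xs)-1; if len<2 return 1; elif i%2!=0 return xs[i]*rec(xs[:i]) else rec(xs[:i])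
def multiplicar_pos_impares (xs : List Int) : Int :=
  if xs.length < 2 then 1
  else
    let i : Int := (xs.length : Int) - 1
    if PySem.Int.mod i 2 ≠ 0 then
      PySem.List.pyGetD xs i 0 *
        multiplicar_pos_impares (PySem.List.slice xs none (some i))
    else
      multiplicar_pos_impares (PySem.List.slice xs none (some i))
termination_by xs.length
decreasing_by
  all_goals
    rw [PySem.List.slice_to xs (by omega : (0:Int) ≤ (xs.length : Int) - 1)]
    simp only [List.length_take]
    omega

-- ===== PORT B =====
-- literal port of B: prod = 1; for i in range(1, len(xs), 2): prod *= xs[i]; return prod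
def multiplicar_pos_impares_alt (xs : List Int) : Int :=
  (PySem.List.pyRange 1 (xs.length : Int) 2).foldl
    (fun prod i => prod * PySem.List.pyGetD xs i 0) 1

-- ===== PRECONDITION & SPEC =====
def Spec_multiplicar_pos_impares (xs : List Int) (out : Int) : Prop := out = multiplicar_pos_impares_alt xs
instance (xs : List Int) (out : Int) : Decidable (Spec_multiplicar_pos_impares xs out) := by unfold Spec_multiplicar_pos_impares; infer_instance

-- ===== CLAIM (what is proved, stated in full; the proofs are below) =====
def Claim_equal_multiplicar_pos_impares : Prop := ∀ (xs : List Int), Dom_multiplicar_pos_impares xs → Spec_multiplicar_pos_impares xs (multiplicar_pos_impares xs)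

-- ===== LEMMAS AND PROOFS =====

-- common characterisation: the product of the elements at odd positions
def pvOddProd : List Int → Int
  | [] => 1
  | [_] => 1
  | _ :: b :: t => b * pvOddProd t

lemma pvRange_two (m : Nat) :
    PySem.List.pyRange 1 (m : Int) 2 =
      (List.range (m / 2)).map (fun k => ((2 * k + 1 : Nat) : Int)) := by
  rw [PySem.List.pyRange_of_pos 1 (m : Int) (by norm_num)]
  have hcount : (if (1 : Int) < (m : Int) then (((m : Int) - 1 + 2 - 1) / 2).toNat else 0) = m / 2 := by
    split_ifs with h
    · have : ((m : Int) - 1 + 2 - 1) = (m : Int) := by ring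
      rw [this]
      omega
    · omega
  rw [hcount]
  apply List.map_congr_left
  intro k _
  push_cast
  ring

lemma pvFoldl_mul_init {β : Type} (g : β → Int) (l : List β) (a : Int) :
    l.foldl (fun p i => p * g i) a = a * l.foldl (fun p i => p * g i) 1 := by
  induction l generalizing a with
  | nil => simp
  | cons x t ih =>
    simp only [List.foldl_cons]
    rw [ih (a * g x), ih (1 * g x)]
    ring

lemma pvAlt_eq_oddProd (xs : List Int) :
    multiplicar_pos_impares_alt xs = pvOddProd xs := by
  unfold multiplicar_pos_impares_alt
  rw [pvRange_two]
  simp only [List.foldl_map, PySem.List.pyGetD_natCast]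
  induction xs using pvOddProd.induct with
  | case1 => simp [pvOddProd]
  | case2 a => simp [pvOddProd]
  | case3 a b t ih =>
    have hlen : (a :: b :: t).length / 2 = t.length / 2 + 1 := by
      simp only [List.length_cons]; omega
    rw [hlen, List.range_succ_eq_map]
    simp only [List.foldl_cons, List.foldl_map]
    have hb : (1 : Int) * (a :: b :: t).getD (2 * 0 + 1) 0 = b := by simp
    rw [hb]
    have hfun : ∀ (p : Int) (k : Nat),
        p * (a :: b :: t).getD (2 * Nat.succ k + 1) 0 = p * t.getD (2 * k + 1) 0 := by
      intro p k
      have h : 2 * Nat.succ k + 1 = (2 * k + 1) + 2 := by omega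
      rw [h]
      rfl
    simp only [hfun]
    rw [pvFoldl_mul_init (fun k => t.getD (2 * k + 1) 0), ih]
    simp [pvOddProd]

lemma pvOddProd_append (ys : List Int) (a : Int) :
    pvOddProd (ys ++ [a]) = if ys.length % 2 = 1 then a * pvOddProd ys else pvOddProd ys := by
  induction ys using pvOddProd.induct with
  | case1 => simp [pvOddProd]
  | case2 x => simp [pvOddProd]
  | case3 x y t ih =>
    simp only [List.cons_append, pvOddProd, ih, List.length_cons]
    have hpar : (t.length + 1 + 1) % 2 = t.length % 2 := by omega
    rw [hpar]
    split_ifs <;> ring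

lemma pvA_eq_oddProd (xs : List Int) : multiplicar_pos_impares xs = pvOddProd xs := by
  induction xs using List.reverseRecOn with
  | nil =>
    rw [multiplicar_pos_impares]
    simp [pvOddProd]
  | append_singleton ys a ih =>
    rw [multiplicar_pos_impares]
    by_cases hshort : (ys ++ [a]).length < 2
    · simp only [if_pos hshort]
      have : ys = [] := by
        cases ys with
        | nil => rfl
        | cons _ _ => simp at hshort
      subst this
      simp [pvOddProd]
    · simp only [if_neg hshort]
      have hlen : ((ys ++ [a]).length : Int) - 1 = (ys.length : Int) := by
        simp
      have hslice : PySem.List.slice (ys ++ [a]) none (some (((ys ++ [a]).length : Int) - 1)) = ys := by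
        rw [hlen, PySem.List.slice_to_natCast]
        exact List.take_left
      have hget : PySem.List.pyGetD (ys ++ [a]) (((ys ++ [a]).length : Int) - 1) 0 = a := by
        rw [hlen, PySem.List.pyGetD_natCast]
        simp
      have hmod : PySem.Int.mod (((ys ++ [a]).length : Int) - 1) 2 = ((ys.length % 2 : Nat) : Int) := by
        rw [hlen]
        exact_mod_cast PySem.Int.mod_natCast ys.length 2
      rw [pvOddProd_append]
      by_cases hpar : ys.length % 2 = 1
      · have : PySem.Int.mod (((ys ++ [a]).length : Int) - 1) 2 ≠ 0 := by
          rw [hmod, hpar]; norm_num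
        simp only [if_pos this, if_pos hpar, hslice, hget, ih]
      · have : ¬ PySem.Int.mod (((ys ++ [a]).length : Int) - 1) 2 ≠ 0 := by
          rw [hmod]
          have : ys.length % 2 = 0 := by omega
          rw [this]
          simp
        simp only [if_neg this, if_neg hpar, hslice, ih]

-- ===== VERDICT (by name: the statement is the Claim_ definition above) =====
theorem multiplicar_pos_impares_spec : Claim_equal_multiplicar_pos_impares := by
  intro xs _
  unfold Spec_multiplicar_pos_impares
  rw [pvA_eq_oddProd, pvAlt_eq_oddProd]
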